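-- pv_equiv track=rewrite | github.com/felipeescastro/QuickSI_intoAnsysMinerva | z0_xt_scan/functions.py | extract_components_list_fromJson
-- ===== SOURCE A (Python) =====
-- def extract_components_list_fromJson(imported_json):
--     """
--     Extract All Components Name from *.json file
--
--     :param:
--         imported_json: Dict
--             *.json file from which the names will be extracted
--
--     :return:
--         componentsList: list of str
--                 Components name list
--
--     """
--     netsType = ["SingleEndedNets", "DifferentialNets", "ExtendedNets", "ExtendedDifferentialNets"]
--     componentsList = []
--     for netType in netsType:
--         if netType in imported_json["XTTD scan"].keys() :
--             componentsType = ['DriverComponent', 'ReceiverComponent']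
--             for componenttype in componentsType:
--                 for i in range(0, len(imported_json["XTTD scan"][netType])):
--                     componentsList.append(imported_json["XTTD scan"][netType][i][componenttype])
--
--     # make sure to avoid repetitive components names in the list
--     componentsList.sort()
--     uniqueNameList=[]
--     for i in range(0, len(componentsList)):
--         if i == 0:
--             current_comp_name = componentsList[i]
--             uniqueNameList.append(current_comp_name)
--         else:
--             previous_comp_name = current_comp_name
--             current_comp_name = componentsList[i]
--             # the component list is sorted, so if the previous name is the same as the actual one
--             # skip it
--             if current_comp_name != previous_comp_name:
--                 uniqueNameList.append(current_comp_name)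
--     return uniqueNameList
-- ===== SOURCE B (Python) =====
-- def _insert_sorted_unique(name, lst):
--     """Insert name into strictly-sorted lst, keeping it sorted and duplicate-free."""
--     if not lst:
--         return [name]
--     head = lst[0]
--     if name < head:
--         return [name] + lst
--     if name == head:
--         return lst
--     return [head] + _insert_sorted_unique(name, lst[1:])
--
--
-- def extract_components_list_fromJson(imported_json):
--     scan = imported_json["XTTD scan"]
--     result = []
--     for netType in ("SingleEndedNets", "DifferentialNets",
--                     "ExtendedNets", "ExtendedDifferentialNets"):
--         if netType in scan:
--             for row in scan[netType]:
--                 result = _insert_sorted_unique(row["DriverComponent"], result)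
--                 result = _insert_sorted_unique(row["ReceiverComponent"], result)
--     return result
-- ===== Notes on version B (the rewrite author's own statement) =====
-- stated objective: alternative
-- what changed: A collects all names, sorts the whole list, then removes duplicates with an index-based previous/current adjacency-scan; B never sorts at all: it maintains a strictly-sorted duplicate-free accumulator and inserts each name into its ordered position (skipping it if already present) the moment it is encountered, in a single online pass.
import Mathlib
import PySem

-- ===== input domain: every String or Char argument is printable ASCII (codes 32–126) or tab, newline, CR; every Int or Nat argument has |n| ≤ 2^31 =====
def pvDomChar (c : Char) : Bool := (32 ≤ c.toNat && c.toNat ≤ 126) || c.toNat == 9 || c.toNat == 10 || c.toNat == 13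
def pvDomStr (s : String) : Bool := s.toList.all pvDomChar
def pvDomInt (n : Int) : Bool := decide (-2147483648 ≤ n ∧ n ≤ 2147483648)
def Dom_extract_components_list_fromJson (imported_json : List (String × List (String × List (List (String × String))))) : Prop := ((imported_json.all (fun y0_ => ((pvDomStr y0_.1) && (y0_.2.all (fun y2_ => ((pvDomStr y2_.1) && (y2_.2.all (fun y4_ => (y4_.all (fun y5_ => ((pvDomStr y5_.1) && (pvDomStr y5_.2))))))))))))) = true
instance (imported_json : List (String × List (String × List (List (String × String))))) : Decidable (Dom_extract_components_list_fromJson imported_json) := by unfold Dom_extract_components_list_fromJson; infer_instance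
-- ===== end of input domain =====

-- B replaces A's collect-all / sort / adjacency-dedup pipeline by an online algorithm that
-- never sorts: each name is inserted into its ordered position of a strictly-sorted
-- duplicate-free accumulator (skipped if already present) as it is encountered.
-- ===== PORT A =====
def extract_components_list_fromJson (imported_json : List (String × List (String × List (List (String × String))))) : List String :=
  let netsType := ["SingleEndedNets", "DifferentialNets", "ExtendedNets", "ExtendedDifferentialNets"]
  let componentsList : List String :=
    netsType.foldl (fun componentsList netType =>
      if (PySem.Dict.mk ((PySem.Dict.mk imported_json).getD "XTTD scan" [])).contains netType then
        let componentsType := ["DriverComponent", "ReceiverComponent"]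
        componentsType.foldl (fun componentsList componenttype =>
          (PySem.List.pyRange 0 (PySem.List.len ((PySem.Dict.mk ((PySem.Dict.mk imported_json).getD "XTTD scan" [])).getD netType [])) 1).foldl
            (fun componentsList i =>
              componentsList ++ [PySem.Dict.getD (PySem.Dict.mk (PySem.List.pyGetD ((PySem.Dict.mk ((PySem.Dict.mk imported_json).getD "XTTD scan" [])).getD netType []) i [])) componenttype ""])
            componentsList) componentsList
      else componentsList) []
  let sortedL := PySem.List.sorted componentsList (fun x => x) false
  ((PySem.List.pyRange 0 (PySem.List.len sortedL) 1).foldl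
    (fun (st : String × List String) i =>
      if i == 0 then
        let current := PySem.List.pyGetD sortedL i ""
        (current, st.2 ++ [current])
      else
        let previous := st.1
        let current := PySem.List.pyGetD sortedL i ""
        (current, if current ≠ previous then st.2 ++ [current] else st.2))
    ("", [])).2

-- ===== PORT B =====
-- Source B's _insert_sorted_unique: insert name into strictly-sorted lst, keeping it sorted and duplicate-free
def pvInsertSortedUnique (name : String) : List String → List String
  | [] => [name]
  | head :: t =>
    if name < head then name :: head :: t
    else if name == head then head :: t
    else head :: pvInsertSortedUnique name t

def extract_components_list_fromJson_alt (imported_json : List (String × List (String × List (List (String × String))))) : List String :=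
  let scan := (PySem.Dict.mk imported_json).getD "XTTD scan" []
  ["SingleEndedNets", "DifferentialNets", "ExtendedNets", "ExtendedDifferentialNets"].foldl
    (fun result netType =>
      if (PySem.Dict.mk scan).contains netType then
        ((PySem.Dict.mk scan).getD netType []).foldl
          (fun result row =>
            pvInsertSortedUnique (PySem.Dict.getD (PySem.Dict.mk row) "ReceiverComponent" "")
              (pvInsertSortedUnique (PySem.Dict.getD (PySem.Dict.mk row) "DriverComponent" "") result))
          result
      else result) []

-- ===== PRECONDITION & SPEC =====
-- Pre_ excludes exactly the inputs on which Python A raises KeyError: a missing "XTTD scan"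
-- key, or a row dict missing "DriverComponent"/"ReceiverComponent" under one of the four net types.
def Pre_extract_components_list_fromJson (imported_json : List (String × List (String × List (List (String × String))))) : Prop :=
  (PySem.Dict.mk imported_json).contains "XTTD scan" = true ∧
  ∀ netType ∈ ["SingleEndedNets", "DifferentialNets", "ExtendedNets", "ExtendedDifferentialNets"],
    ∀ row ∈ (PySem.Dict.mk ((PySem.Dict.mk imported_json).getD "XTTD scan" [])).getD netType [],
      (PySem.Dict.mk row).contains "DriverComponent" = true ∧
      (PySem.Dict.mk row).contains "ReceiverComponent" = true
instance (imported_json : List (String × List (String × List (List (String × String))))) : Decidable (Pre_extract_components_list_fromJson imported_json) := by unfold Pre_extract_components_list_fromJson; infer_instance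
def pvWitness_extract_components_list_fromJson : (List (String × List (String × List (List (String × String))))) :=
  [("XTTD scan", [("SingleEndedNets", [[("DriverComponent", "U1"), ("ReceiverComponent", "U2")]])])]
def Spec_extract_components_list_fromJson (imported_json : List (String × List (String × List (List (String × String))))) (out : List String) : Prop := out = extract_components_list_fromJson_alt imported_json
instance (imported_json : List (String × List (String × List (List (String × String))))) (out : List String) : Decidable (Spec_extract_components_list_fromJson imported_json out) := by unfold Spec_extract_components_list_fromJson; infer_instance

-- ===== CLAIM (what is proved, stated in full; the proofs are below) =====
def Claim_equal_extract_components_list_fromJson : Prop := ∀ (imported_json : List (String × List (String × List (List (String × String))))), Dom_extract_components_list_fromJson imported_json → Pre_extract_components_list_fromJson imported_json → Spec_extract_components_list_fromJson imported_json (extract_components_list_fromJson imported_json)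

-- ===== LEMMAS AND PROOFS =====

-- structural form of A's adjacent-dedup loop body
def pvGoDedup (prev : String) : List String → List String
  | [] => []
  | x :: xs => if x ≠ prev then x :: pvGoDedup x xs else pvGoDedup x xs

theorem pvFoldlG (xs : List String) (cur : String) (acc : List String) :
    (xs.foldl (fun (st : String × List String) c =>
        (c, if c ≠ st.1 then st.2 ++ [c] else st.2)) (cur, acc)).2
      = acc ++ pvGoDedup cur xs := by
  induction xs generalizing cur acc with
  | nil => simp [pvGoDedup]
  | cons x xs ih =>
    simp only [List.foldl_cons]
    by_cases h : x = cur
    · subst h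
      rw [if_neg (by simp), ih,
        show pvGoDedup x (x :: xs) = pvGoDedup x xs from by simp [pvGoDedup]]
    · rw [if_pos (by simpa using h), ih,
        show pvGoDedup cur (x :: xs) = x :: pvGoDedup x xs from by simp [pvGoDedup, h],
        List.append_assoc]
      rfl

theorem pvGoDedup_spec (xs : List String) (prev : String)
    (h : (prev :: xs).Pairwise (· ≤ ·)) :
    (prev :: pvGoDedup prev xs).Pairwise (· < ·) ∧
      (∀ y, y ∈ pvGoDedup prev xs ↔ y ∈ xs ∧ y ≠ prev) := by
  induction xs generalizing prev with
  | nil => simp [pvGoDedup]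
  | cons x xs ih =>
    rcases List.pairwise_cons.1 h with ⟨hle, htail⟩
    have hpx : prev ≤ x := hle x (by simp)
    by_cases hx : x = prev
    · subst hx
      have hrec := ih x htail
      rw [show pvGoDedup x (x :: xs) = pvGoDedup x xs by simp [pvGoDedup]]
      refine ⟨hrec.1, fun y => ?_⟩
      rw [hrec.2 y, List.mem_cons]
      constructor
      · rintro ⟨hy, hne⟩; exact ⟨Or.inr hy, hne⟩
      · rintro ⟨rfl | hy, hne⟩
        · exact absurd rfl hne
        · exact ⟨hy, hne⟩
    · have hlt : prev < x := lt_of_le_of_ne hpx (fun e => hx e.symm)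
      have hrec := ih x htail
      rw [show pvGoDedup prev (x :: xs) = x :: pvGoDedup x xs by simp [pvGoDedup, hx]]
      constructor
      · refine List.pairwise_cons.2 ⟨?_, hrec.1⟩
        intro y hy
        rcases List.mem_cons.1 hy with rfl | hy
        · exact hlt
        · have hyx := (hrec.2 y).1 hy
          exact hlt.trans_le ((List.pairwise_cons.1 htail).1 y hyx.1)
      · intro y
        rw [List.mem_cons, hrec.2 y, List.mem_cons]
        constructor
        · rintro (rfl | ⟨hy, hne⟩)
          · exact ⟨Or.inl rfl, hx⟩
          · exact ⟨Or.inr hy, (hlt.trans_le ((List.pairwise_cons.1 htail).1 y hy)).ne'⟩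
        · rintro ⟨rfl | hy, hne⟩
          · exact Or.inl rfl
          · by_cases hyx : y = x
            · exact Or.inl hyx
            · exact Or.inr ⟨hy, hyx⟩

theorem pvCollectRows (rows : List (List (String × String))) (ct : String) (acc : List String) :
    (PySem.List.pyRange 0 (PySem.List.len rows) 1).foldl
        (fun a i => a ++ [PySem.Dict.getD (PySem.Dict.mk (PySem.List.pyGetD rows i [])) ct ""]) acc
      = acc ++ rows.map (fun row => PySem.Dict.getD (PySem.Dict.mk row) ct "") := by
  rw [PySem.List.foldl_pyRange_zero_pyGetD rows []
      (fun a row => a ++ [PySem.Dict.getD (PySem.Dict.mk row) ct ""]) acc,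
    PySem.List.foldl_append_singleton_eq_map]

def pvDedupA : List String → List String
  | [] => []
  | m :: t => m :: pvGoDedup m t

theorem pvDedupLoop (s : List String) :
    ((PySem.List.pyRange 0 (PySem.List.len s) 1).foldl
      (fun (st : String × List String) i =>
        if i == 0 then
          let current := PySem.List.pyGetD s i ""
          (current, st.2 ++ [current])
        else
          let previous := st.1
          let current := PySem.List.pyGetD s i ""
          (current, if current ≠ previous then st.2 ++ [current] else st.2))
      ("", [])).2 = pvDedupA s := by
  cases s with
  | nil => simp [PySem.List.len, PySem.List.pyRange_one_eq_nil, pvDedupA]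
  | cons m t =>
    have h0 : (0 : Int) < PySem.List.len (m :: t) := by
      simp [PySem.List.len_eq]
    rw [PySem.List.pyRange_one_cons h0, show (0:Int) + 1 = 1 by decide]
    simp only [List.foldl_cons, beq_self_eq_true, if_pos, PySem.List.pyGetD_zero_cons,
      List.nil_append]
    rw [PySem.List.foldl_congr_mem _ _
        (fun (st : String × List String) i =>
          (fun (st : String × List String) (c : String) =>
            (c, if c ≠ st.1 then st.2 ++ [c] else st.2)) st (PySem.List.pyGetD (m :: t) i ""))
        (m, [m])
        (by
          intro acc i hi
          rw [PySem.List.mem_pyRange_one] at hi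
          have : (i == 0) = false := by simp; omega
          simp [this])]
    beta_reduce
    rw [PySem.List.foldl_pyRange_pyGetD (m :: t) ""
      (fun (st : String × List String) (c : String) =>
        (c, if c ≠ st.1 then st.2 ++ [c] else st.2)) (m, [m]) (a := 1) (by omega)]
    simp only [Int.toNat_one, List.drop_succ_cons, List.drop_zero]
    rw [pvFoldlG]
    rfl

-- B-side: pvInsertSortedUnique preserves strict sortedness and adds exactly the new name
theorem pvInsert_spec (n : String) (l : List String) (h : l.Pairwise (· < ·)) :
    (pvInsertSortedUnique n l).Pairwise (· < ·) ∧
      (∀ y, y ∈ pvInsertSortedUnique n l ↔ y = n ∨ y ∈ l) := by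
  induction l with
  | nil => simp [pvInsertSortedUnique]
  | cons head t ih =>
    rcases List.pairwise_cons.1 h with ⟨hhd, ht⟩
    by_cases h1 : n < head
    · rw [show pvInsertSortedUnique n (head :: t) = n :: head :: t by
        simp [pvInsertSortedUnique, h1]]
      refine ⟨List.pairwise_cons.2 ⟨?_, h⟩, by intro y; simp⟩
      intro y hy
      rcases List.mem_cons.1 hy with rfl | hy
      · exact h1
      · exact h1.trans (hhd y hy)
    · by_cases h2 : n = head
      · subst h2
        rw [show pvInsertSortedUnique n (n :: t) = n :: t by
          simp [pvInsertSortedUnique]]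
        exact ⟨h, by intro y; simp⟩
      · rw [show pvInsertSortedUnique n (head :: t) = head :: pvInsertSortedUnique n t by
          simp [pvInsertSortedUnique, h1, h2]]
        obtain ⟨hp, hm⟩ := ih ht
        have hhn : head < n := by
          rcases lt_trichotomy n head with hc | hc | hc
          · exact absurd hc h1
          · exact absurd hc h2
          · exact hc
        constructor
        · refine List.pairwise_cons.2 ⟨?_, hp⟩
          intro y hy
          rcases (hm y).1 hy with rfl | hy
          · exact hhn
          · exact hhd y hy
        · intro y
          rw [List.mem_cons, hm y, List.mem_cons]
          tauto

-- generic fold lemma: folding step functions that insert F b's names preserves the invariant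
theorem pvFoldInsert_spec {β : Type} (g : List String → β → List String) (F : β → List String)
    (hg : ∀ r b, r.Pairwise (· < ·) →
      (g r b).Pairwise (· < ·) ∧ (∀ y, y ∈ g r b ↔ y ∈ r ∨ y ∈ F b))
    (xs : List β) (acc : List String) (hacc : acc.Pairwise (· < ·)) :
    (xs.foldl g acc).Pairwise (· < ·) ∧
      (∀ y, y ∈ xs.foldl g acc ↔ y ∈ acc ∨ ∃ b ∈ xs, y ∈ F b) := by
  induction xs generalizing acc with
  | nil => exact ⟨hacc, by simp⟩
  | cons b xs ih =>
    obtain ⟨hp, hm⟩ := hg acc b hacc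
    obtain ⟨hp', hm'⟩ := ih (g acc b) hp
    refine ⟨hp', fun y => ?_⟩
    rw [List.foldl_cons] at *
    rw [hm' y, hm y]
    simp only [List.mem_cons]
    constructor
    · rintro ((hy | hy) | ⟨c, hc, hy⟩)
      · exact Or.inl hy
      · exact Or.inr ⟨b, Or.inl rfl, hy⟩
      · exact Or.inr ⟨c, Or.inr hc, hy⟩
    · rintro (hy | ⟨c, rfl | hc, hy⟩)
      · exact Or.inl (Or.inl hy)
      · exact Or.inl (Or.inr hy)
      · exact Or.inr ⟨c, hc, hy⟩

-- the B-side fold: strictly sorted, with membership = all collected names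
theorem pvAltFold_spec (scan : List (String × List (List (String × String)))) :
    ((["SingleEndedNets", "DifferentialNets", "ExtendedNets", "ExtendedDifferentialNets"].foldl
        (fun result netType =>
          if (PySem.Dict.mk scan).contains netType then
            ((PySem.Dict.mk scan).getD netType []).foldl
              (fun result row =>
                pvInsertSortedUnique (PySem.Dict.getD (PySem.Dict.mk row) "ReceiverComponent" "")
                  (pvInsertSortedUnique (PySem.Dict.getD (PySem.Dict.mk row) "DriverComponent" "") result))
              result
          else result) []).Pairwise (· < ·)) ∧
      (∀ y, y ∈ ["SingleEndedNets", "DifferentialNets", "ExtendedNets", "ExtendedDifferentialNets"].foldl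
        (fun result netType =>
          if (PySem.Dict.mk scan).contains netType then
            ((PySem.Dict.mk scan).getD netType []).foldl
              (fun result row =>
                pvInsertSortedUnique (PySem.Dict.getD (PySem.Dict.mk row) "ReceiverComponent" "")
                  (pvInsertSortedUnique (PySem.Dict.getD (PySem.Dict.mk row) "DriverComponent" "") result))
              result
          else result) []
        ↔ ∃ netType ∈ ["SingleEndedNets", "DifferentialNets", "ExtendedNets", "ExtendedDifferentialNets"],
            (PySem.Dict.mk scan).contains netType = true ∧
            ∃ row ∈ (PySem.Dict.mk scan).getD netType [],
              y = PySem.Dict.getD (PySem.Dict.mk row) "DriverComponent" "" ∨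
              y = PySem.Dict.getD (PySem.Dict.mk row) "ReceiverComponent" "") := by
  have hinner : ∀ (rows : List (List (String × String))) (r : List String), r.Pairwise (· < ·) →
      ((rows.foldl (fun result row =>
          pvInsertSortedUnique (PySem.Dict.getD (PySem.Dict.mk row) "ReceiverComponent" "")
            (pvInsertSortedUnique (PySem.Dict.getD (PySem.Dict.mk row) "DriverComponent" "") result)) r).Pairwise (· < ·)) ∧
        (∀ y, y ∈ rows.foldl (fun result row =>
            pvInsertSortedUnique (PySem.Dict.getD (PySem.Dict.mk row) "ReceiverComponent" "")
              (pvInsertSortedUnique (PySem.Dict.getD (PySem.Dict.mk row) "DriverComponent" "") result)) r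
          ↔ y ∈ r ∨ ∃ row ∈ rows,
              y ∈ [PySem.Dict.getD (PySem.Dict.mk row) "DriverComponent" "",
                   PySem.Dict.getD (PySem.Dict.mk row) "ReceiverComponent" ""]) := by
    intro rows r hr
    exact pvFoldInsert_spec _
      (fun row => [PySem.Dict.getD (PySem.Dict.mk row) "DriverComponent" "",
                   PySem.Dict.getD (PySem.Dict.mk row) "ReceiverComponent" ""])
      (by
        intro r row hr
        obtain ⟨hp1, hm1⟩ := pvInsert_spec (PySem.Dict.getD (PySem.Dict.mk row) "DriverComponent" "") r hr
        obtain ⟨hp2, hm2⟩ := pvInsert_spec (PySem.Dict.getD (PySem.Dict.mk row) "ReceiverComponent" "") _ hp1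
        refine ⟨hp2, fun y => ?_⟩
        rw [hm2 y, hm1 y]
        simp only [List.mem_cons, List.not_mem_nil, or_false]
        tauto)
      rows r hr
  have houter := pvFoldInsert_spec
    (fun result netType =>
      if (PySem.Dict.mk scan).contains netType then
        ((PySem.Dict.mk scan).getD netType []).foldl
          (fun result row =>
            pvInsertSortedUnique (PySem.Dict.getD (PySem.Dict.mk row) "ReceiverComponent" "")
              (pvInsertSortedUnique (PySem.Dict.getD (PySem.Dict.mk row) "DriverComponent" "") result))
          result
      else result)
    (fun netType =>
      if (PySem.Dict.mk scan).contains netType then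
        ((PySem.Dict.mk scan).getD netType []).flatMap
          (fun row => [PySem.Dict.getD (PySem.Dict.mk row) "DriverComponent" "",
                       PySem.Dict.getD (PySem.Dict.mk row) "ReceiverComponent" ""])
      else [])
    (by
      intro r netType hr
      by_cases hc : (PySem.Dict.mk scan).contains netType
      · obtain ⟨hp, hm⟩ := hinner ((PySem.Dict.mk scan).getD netType []) r hr
        simp only [hc, if_true]
        exact ⟨hp, fun y => by rw [hm y]; simp [List.mem_flatMap]⟩
      · simp only [hc]
        exact ⟨hr, fun y => by simp⟩)
    ["SingleEndedNets", "DifferentialNets", "ExtendedNets", "ExtendedDifferentialNets"] []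
    (by simp)
  obtain ⟨hp, hm⟩ := houter
  refine ⟨hp, fun y => ?_⟩
  rw [hm y]
  simp only [List.not_mem_nil, false_or]
  constructor
  · rintro ⟨nt, hnt, hy⟩
    by_cases hc : (PySem.Dict.mk scan).contains nt
    · simp only [hc, if_true, List.mem_flatMap] at hy
      obtain ⟨row, hrow, hy⟩ := hy
      exact ⟨nt, hnt, hc, row, hrow, by simpa using hy⟩
    · simp [hc] at hy
  · rintro ⟨nt, hnt, hc, row, hrow, hy⟩
    exact ⟨nt, hnt, by simp only [hc, if_true, List.mem_flatMap]; exact ⟨row, hrow, by simpa using hy⟩⟩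

-- membership characterisation of A's collection loop
theorem pvMemCollect (scan : List (String × List (List (String × String)))) (y : String) :
    (y ∈ ["SingleEndedNets", "DifferentialNets", "ExtendedNets", "ExtendedDifferentialNets"].foldl
        (fun componentsList netType =>
          if (PySem.Dict.mk scan).contains netType then
            ["DriverComponent", "ReceiverComponent"].foldl (fun componentsList componenttype =>
              (PySem.List.pyRange 0 (PySem.List.len ((PySem.Dict.mk scan).getD netType [])) 1).foldl
                (fun componentsList i =>
                  componentsList ++ [PySem.Dict.getD (PySem.Dict.mk
                    (PySem.List.pyGetD ((PySem.Dict.mk scan).getD netType []) i [])) componenttype ""])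
                componentsList) componentsList
          else componentsList) [])
    ↔ y ∈ (["SingleEndedNets", "DifferentialNets", "ExtendedNets", "ExtendedDifferentialNets"].filter
          (fun netType => (PySem.Dict.mk scan).contains netType)).flatMap
        (fun netType =>
          ((PySem.Dict.mk scan).getD netType []).flatMap
            (fun row => ["DriverComponent", "ReceiverComponent"].map
              (fun key => PySem.Dict.getD (PySem.Dict.mk row) key ""))) := by
  simp only [List.foldl_cons, List.foldl_nil, pvCollectRows, List.filter_cons, List.filter_nil]
  split_ifs <;>
    simp [List.mem_append, List.mem_flatMap, List.mem_map, and_or_left, exists_or, eq_comm] <;> simp only [or_assoc]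

-- the flatMap-over-filtered-netTypes form equals the ∃-form used for B
theorem pvNamesBridge (scan : List (String × List (List (String × String)))) (y : String) :
    (y ∈ (["SingleEndedNets", "DifferentialNets", "ExtendedNets", "ExtendedDifferentialNets"].filter
          (fun netType => (PySem.Dict.mk scan).contains netType)).flatMap
        (fun netType =>
          ((PySem.Dict.mk scan).getD netType []).flatMap
            (fun row => ["DriverComponent", "ReceiverComponent"].map
              (fun key => PySem.Dict.getD (PySem.Dict.mk row) key ""))))
    ↔ ∃ netType ∈ ["SingleEndedNets", "DifferentialNets", "ExtendedNets", "ExtendedDifferentialNets"],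
        (PySem.Dict.mk scan).contains netType = true ∧
        ∃ row ∈ (PySem.Dict.mk scan).getD netType [],
          y = PySem.Dict.getD (PySem.Dict.mk row) "DriverComponent" "" ∨
          y = PySem.Dict.getD (PySem.Dict.mk row) "ReceiverComponent" "" := by
  simp only [List.mem_flatMap, List.mem_filter, List.mem_map]
  constructor
  · rintro ⟨nt, ⟨hnt, hc⟩, row, hrow, key, hkey, rfl⟩
    refine ⟨nt, hnt, hc, row, hrow, ?_⟩
    rcases List.mem_cons.1 hkey with rfl | hkey
    · exact Or.inl rfl
    · rcases List.mem_cons.1 hkey with rfl | hkey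
      · exact Or.inr rfl
      · simp at hkey
  · rintro ⟨nt, hnt, hc, row, hrow, rfl | rfl⟩
    · exact ⟨nt, ⟨hnt, hc⟩, row, hrow, "DriverComponent", by simp, rfl⟩
    · exact ⟨nt, ⟨hnt, hc⟩, row, hrow, "ReceiverComponent", by simp, rfl⟩

-- ===== VERDICT (by name: the statement is the Claim_ definition above) =====
theorem extract_components_list_fromJson_spec : Claim_equal_extract_components_list_fromJson := by
  intro ij _hdom _hpre
  unfold Spec_extract_components_list_fromJson
  unfold extract_components_list_fromJson extract_components_list_fromJson_alt
  dsimp only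
  rw [pvDedupLoop]
  set scan := (PySem.Dict.mk ij).getD "XTTD scan" [] with hscan
  set L := ["SingleEndedNets", "DifferentialNets", "ExtendedNets", "ExtendedDifferentialNets"].foldl
      (fun componentsList netType =>
        if (PySem.Dict.mk scan).contains netType then
          ["DriverComponent", "ReceiverComponent"].foldl (fun componentsList componenttype =>
            (PySem.List.pyRange 0 (PySem.List.len ((PySem.Dict.mk scan).getD netType [])) 1).foldl
              (fun componentsList i =>
                componentsList ++ [PySem.Dict.getD (PySem.Dict.mk
                  (PySem.List.pyGetD ((PySem.Dict.mk scan).getD netType []) i [])) componenttype ""])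
              componentsList) componentsList
        else componentsList) [] with hLdef
  set B := ["SingleEndedNets", "DifferentialNets", "ExtendedNets", "ExtendedDifferentialNets"].foldl
      (fun result netType =>
        if (PySem.Dict.mk scan).contains netType then
          ((PySem.Dict.mk scan).getD netType []).foldl
            (fun result row =>
              pvInsertSortedUnique (PySem.Dict.getD (PySem.Dict.mk row) "ReceiverComponent" "")
                (pvInsertSortedUnique (PySem.Dict.getD (PySem.Dict.mk row) "DriverComponent" "") result))
            result
        else result) [] with hBdef
  obtain ⟨hBpair, hBmem⟩ := pvAltFold_spec scan
  rw [← hBdef] at hBpair hBmem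
  have hmem : ∀ y, y ∈ L ↔ y ∈ B := fun y => by
    rw [hLdef, pvMemCollect scan y, pvNamesBridge scan y, hBmem y]
  have hApairLe : (PySem.List.sorted L (fun x => x) false).Pairwise (· ≤ ·) :=
    PySem.List.sorted_pairwise L (fun x => x)
  cases hs : PySem.List.sorted L (fun x => x) false with
  | nil =>
    have hLnil : L = [] := by
      rw [← PySem.List.sorted_eq_nil_iff (key := fun x => x) (rev := false)]; exact hs
    have hBnil : B = [] := by
      rw [List.eq_nil_iff_forall_not_mem]
      intro y hy
      exact (List.not_mem_nil (a := y)) (hLnil ▸ ((hmem y).2 hy))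
    rw [hBnil]
    rfl
  | cons m t =>
    rw [hs] at hApairLe
    obtain ⟨hApair, hAmem⟩ := pvGoDedup_spec t m hApairLe
    have hAmem2 : ∀ y, y ∈ m :: pvGoDedup m t ↔ y ∈ B := by
      intro y
      have hyL : y ∈ L ↔ y ∈ m :: t := by rw [← hs, PySem.List.mem_sorted]
      rw [List.mem_cons, hAmem y, ← hmem y, hyL, List.mem_cons]
      constructor
      · rintro (rfl | ⟨hy, _⟩)
        · exact Or.inl rfl
        · exact Or.inr hy
      · rintro (rfl | hy)
        · exact Or.inl rfl
        · by_cases hym : y = m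
          · exact Or.inl hym
          · exact Or.inr ⟨hy, hym⟩
    show pvDedupA (m :: t) = _
    have hperm : (m :: pvGoDedup m t).Perm B := by
      rw [List.perm_ext_iff_of_nodup (hApair.imp ne_of_lt) (hBpair.imp ne_of_lt)]
      intro y
      exact hAmem2 y
    exact hperm.eq_of_pairwise
      (fun a b _ _ h1 h2 => absurd h2 (not_lt.2 h1.le)) hApair hBpair
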